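-- pv_equiv track=rewrite | github.com/mmiguel6288code/bitarchitect | bitarchitect/pattern.py | get_stream_index
-- ===== SOURCE A (Python) =====
-- def get_stream_index(structure_pattern,structure_index):
--     """
--     Translates the sequence of indices identifying an item  in a hierarchy
--     to the index identifying the same item in the flattened data stream.
--     The structure indices must point to a value, not a list.
--     >>> get_stream_index('..[[[.]..].].',[0])
--     0
--     >>> get_stream_index('..[[[.]..].].',[2,0,0,0])
--     2
--     >>> get_stream_index('..[[[.]..].].',[2,1])
--     5
--     """
--     structure_index = list(structure_index)
--     stream_index = 0
--     current_structure_index  = [0]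
--     for p in structure_pattern:
--         if p == '[':
--             if current_structure_index >= structure_index:
--                 raise Exception('Provided structure_index does not point to a non-list element')
--             current_structure_index.append(0)
--         elif p == ']':
--             if current_structure_index >= structure_index:
--                 raise Exception('Provided structure_index does not point to a non-list element')
--             current_structure_index.pop(-1)
--             current_structure_index[-1] += 1
--         elif p == '.':
--             if current_structure_index == structure_index:
--                 return stream_index
--             stream_index += 1
--             current_structure_index[-1] += 1
--         else:
--             raise Exception('Invalid character in structure pattern: %s' % repr(p))
-- ===== SOURCE B (Python) =====
-- def get_stream_index(structure_pattern, structure_index):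
--     """Parse the whole pattern once into the list of hierarchical paths of its
--     '.' atoms, then look the target path up in that index."""
--     path = [0]
--     dot_paths = []
--     for p in structure_pattern:
--         if p == '.':
--             dot_paths.append(tuple(path))
--             path[-1] += 1
--         elif p == '[':
--             path.append(0)
--         elif p == ']':
--             path.pop(-1)
--             if not path:
--                 raise IndexError('unbalanced structure pattern')
--             path[-1] += 1
--         else:
--             raise ValueError('Invalid character in structure pattern: %s' % repr(p))
--     target = tuple(structure_index)
--     return dot_paths.index(target) if target in dot_paths else None
-- ===== Notes on version B (the rewrite author's own statement) =====
-- stated objective: alternative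
-- what changed: B replaces A's target-tracking scan (compare the running hierarchical path against the target at every character and return mid-scan) by a full parse of the pattern into the list of its '.'-atom paths followed by a single index lookup.
-- outside the precondition, e.g. on get_stream_index('.x', [0]): A returns 0, B raises ValueError; on get_stream_index('.]', [0]): A returns 0, B raises IndexError
import Mathlib
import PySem

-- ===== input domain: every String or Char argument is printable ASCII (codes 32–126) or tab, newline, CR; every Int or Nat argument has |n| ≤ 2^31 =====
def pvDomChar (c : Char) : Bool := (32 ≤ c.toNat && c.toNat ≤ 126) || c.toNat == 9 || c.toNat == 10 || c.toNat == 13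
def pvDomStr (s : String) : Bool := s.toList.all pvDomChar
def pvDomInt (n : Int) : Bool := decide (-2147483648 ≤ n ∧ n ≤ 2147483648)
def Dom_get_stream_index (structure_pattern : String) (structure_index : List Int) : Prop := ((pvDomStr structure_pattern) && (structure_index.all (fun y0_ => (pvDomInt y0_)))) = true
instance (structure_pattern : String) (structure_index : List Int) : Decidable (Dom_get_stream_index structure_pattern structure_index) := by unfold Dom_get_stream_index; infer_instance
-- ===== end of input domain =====

-- B parses the whole pattern once into the list of its '.'-atom paths and then does one index
-- lookup, instead of A's target-tracking scan; equivalence is about the return value on Pre_.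

-- Python's lexicographic '<' on lists of ints (hand port, exact: first differing element
-- decides, otherwise the shorter list is smaller).  'cur >= target' is '¬ pvListLt cur target'.
def pvListLt : List Int → List Int → Bool
  | [], [] => false
  | [], _ :: _ => true
  | _ :: _, [] => false
  | a :: as, b :: bs => if a < b then true else if b < a then false else pvListLt as bs

-- ===== PORT A =====
-- 'xs[-1] += 1' : none = IndexError on the empty list, else the last element incremented.
def pvIncLast? : List Int → Option (List Int)
  | [] => none
  | [a] => some [a + 1]
  | a :: b :: r => (pvIncLast? (b :: r)).map (a :: ·)

-- A's for-loop; none = the Python raises, some o = the Python returns o (o = none ↦ fall off the end).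
def pvLoopA : List Char → Int → List Int → List Int → Option (Option Int)
  | [], _, _, _ => some none
  | p :: rest, stream, cur, target =>
    if p = '[' then
      if pvListLt cur target then pvLoopA rest stream (cur ++ [0]) target
      else none
    else if p = ']' then
      if pvListLt cur target then
        match pvIncLast? cur.dropLast with   -- cur.pop(-1); cur[-1] += 1 (dropLast [] = [] = pop's IndexError list too)
        | none => none
        | some cur' => pvLoopA rest stream cur' target
      else none
    else if p = '.' then
      if cur = target then some (some stream)
      else
        match pvIncLast? cur with
        | none => none
        | some cur' => pvLoopA rest (stream + 1) cur' target
    else none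

def get_stream_index (structure_pattern : String) (structure_index : List Int) : Option Int :=
  match pvLoopA structure_pattern.toList 0 [0] structure_index with
  | some o => o
  | none => none   -- A raises here; excluded by Pre_

-- ===== PORT B =====
-- total 'path[-1] += 1' used by B, where the guard keeps path nonempty
def pvIncLastT (p : List Int) : List Int := p.dropLast ++ [p.getLastD 0 + 1]

-- B's parsing loop: collect the path of every '.'; none = the Python raises.
def pvLoopB : List Char → List Int → List (List Int) → Option (List (List Int))
  | [], _, acc => some acc
  | p :: rest, path, acc =>
    if p = '.' then pvLoopB rest (pvIncLastT path) (acc ++ [path])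
    else if p = '[' then pvLoopB rest (path ++ [0]) acc
    else if p = ']' then
      if path.dropLast = [] then none   -- path.pop(-1) on [] or the explicit unbalanced-pattern raise
      else pvLoopB rest (pvIncLastT path.dropLast) acc
    else none   -- ValueError: invalid character

def get_stream_index_alt (structure_pattern : String) (structure_index : List Int) : Option Int :=
  match pvLoopB structure_pattern.toList [0] [] with
  | none => none   -- B raises here; excluded by Pre_
  | some dots =>
    if structure_index ∈ dots then (PySem.List.index? dots structure_index).map (fun n => (n : Int))
    else none

-- ===== PRECONDITION & SPEC =====
-- spec-level characterisation: the hierarchical path at which each pattern character is read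
def pvStep (c : Char) (p : List Int) : List Int :=
  if c = '[' then p ++ [0]
  else if c = ']' then pvIncLastT p.dropLast
  else if c = '.' then pvIncLastT p
  else p

def pvPaths : List Char → List Int → List (Char × List Int)
  | [], _ => []
  | c :: rest, p => (c, p) :: pvPaths rest (pvStep c p)

-- depth check: n is the current path length; every ']' needs depth ≥ 2
def pvBal : Nat → List Char → Bool
  | _, [] => true
  | n, c :: rest =>
    if c = '[' then pvBal (n + 1) rest
    else if c = ']' then decide (2 ≤ n) && pvBal (n - 1) rest
    else pvBal n rest

-- Pre_ admits exactly the inputs A scans to a normal return: every character is '[', ']' or '.',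
-- no ']' closes the root level, and the target path either names a '.' atom or lies beyond every
-- bracket's path.  This also excludes inputs where a bad character or root-closing ']' occurs only
-- AFTER the '.' A returns at: A returns there without reading the flaw, B validates the whole
-- pattern and raises — a deliberate narrowing, see the claim's cites.
def Pre_get_stream_index (structure_pattern : String) (structure_index : List Int) : Prop :=
  (structure_pattern.toList.all fun c => c == '[' || c == ']' || c == '.') = true ∧
  pvBal 1 structure_pattern.toList = true ∧
  ((pvPaths structure_pattern.toList [0]).any (fun pr => pr.1 == '.' && pr.2 == structure_index)
   || (pvPaths structure_pattern.toList [0]).all (fun pr => !(pr.1 == '[' || pr.1 == ']') || decide (pr.2 < structure_index))) = true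
instance (structure_pattern : String) (structure_index : List Int) : Decidable (Pre_get_stream_index structure_pattern structure_index) := by unfold Pre_get_stream_index; infer_instance

def pvWitness_get_stream_index : String × List Int := ("..[[[.]..].].", [2, 1])

def Spec_get_stream_index (structure_pattern : String) (structure_index : List Int) (out : Option Int) : Prop := out = get_stream_index_alt structure_pattern structure_index
instance (structure_pattern : String) (structure_index : List Int) (out : Option Int) : Decidable (Spec_get_stream_index structure_pattern structure_index out) := by unfold Spec_get_stream_index; infer_instance

-- ===== CLAIM (what is proved, stated in full; the proofs are below) =====
def Claim_equal_get_stream_index : Prop := ∀ (structure_pattern : String) (structure_index : List Int), Dom_get_stream_index structure_pattern structure_index → Pre_get_stream_index structure_pattern structure_index → Spec_get_stream_index structure_pattern structure_index (get_stream_index structure_pattern structure_index)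


-- ===== LEMMAS AND PROOFS =====

lemma pvListLt_trans : ∀ (a b c : List Int), pvListLt a b = true → pvListLt b c = true → pvListLt a c = true := by
  intro a
  induction a with
  | nil =>
    intro b c h1 h2
    cases b with
    | nil => simp [pvListLt] at h1
    | cons y ys => cases c with
      | nil => simp [pvListLt] at h2
      | cons z zs => simp [pvListLt]
  | cons x xs ih =>
    intro b c h1 h2
    cases b with
    | nil => simp [pvListLt] at h1
    | cons y ys => cases c with
      | nil => simp [pvListLt] at h2
      | cons z zs =>
        simp only [pvListLt] at h1 h2 ⊢
        split_ifs at h1 h2 ⊢ <;> first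
          | rfl
          | omega
          | (exact ih ys zs h1 h2)

lemma pvListLt_append (p : List Int) (x : Int) (xs : List Int) : pvListLt p (p ++ x :: xs) = true := by
  induction p with
  | nil => simp [pvListLt]
  | cons a as ih => simp [pvListLt, ih]

lemma pvIncLastT_cons (a : Int) (q : List Int) (h : q ≠ []) : pvIncLastT (a :: q) = a :: pvIncLastT q := by
  cases q with
  | nil => simp at h
  | cons b r => simp [pvIncLastT]

lemma pvListLt_inc : ∀ (p : List Int), p ≠ [] → pvListLt p (pvIncLastT p) = true := by
  intro p
  induction p with
  | nil => simp
  | cons a q ih =>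
    intro _
    cases q with
    | nil => simp [pvIncLastT, pvListLt]
    | cons b r =>
      rw [pvIncLastT_cons a (b :: r) (by simp)]
      simp [pvListLt, ih (by simp)]

lemma pvListLt_close : ∀ (p : List Int), 2 ≤ p.length → pvListLt p (pvIncLastT p.dropLast) = true := by
  intro p
  induction p with
  | nil => simp
  | cons a q ih =>
    intro h
    cases q with
    | nil => simp at h
    | cons b r =>
      cases r with
      | nil => simp [pvIncLastT, pvListLt]
      | cons c r' =>
        have hd : (b :: c :: r').dropLast ≠ [] := by simp
        have : (a :: b :: c :: r').dropLast = a :: (b :: c :: r').dropLast := by simp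
        rw [this, pvIncLastT_cons a _ hd]
        simp only [pvListLt, if_neg (lt_irrefl a)]
        exact ih (by simp)

lemma pvIncLastT_length (q : List Int) (h : q ≠ []) : (pvIncLastT q).length = q.length := by
  simp [pvIncLastT]
  have := List.length_pos_of_ne_nil h
  omega

lemma pvIncLast?_eq : ∀ (q : List Int), q ≠ [] → pvIncLast? q = some (pvIncLastT q) := by
  intro q
  induction q with
  | nil => simp
  | cons a r ih =>
    intro _
    cases r with
    | nil => simp [pvIncLast?, pvIncLastT]
    | cons b s =>
      simp only [pvIncLast?, ih (by simp), Option.map_some]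
      rw [pvIncLastT_cons a _ (by simp)]

lemma pvStep_lt (c : Char) (p : List Int) (hv : c = '[' ∨ c = ']' ∨ c = '.')
    (hp : p ≠ []) (hb : c = ']' → 2 ≤ p.length) : pvListLt p (pvStep c p) = true := by
  rcases hv with h | h | h <;> subst h <;> simp only [pvStep]
  · simpa using pvListLt_append p 0 []
  · simpa using pvListLt_close p (hb rfl)
  · simpa using pvListLt_inc p hp

lemma pvStep_ne (c : Char) (p : List Int) (hp : p ≠ []) (_hb : c = ']' → 2 ≤ p.length) :
    pvStep c p ≠ [] := by
  simp only [pvStep]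
  split_ifs <;> simp [pvIncLastT, hp]

lemma pvStep_length (c : Char) (p : List Int) (hv : c = '[' ∨ c = ']' ∨ c = '.')
    (hp : p ≠ []) (hb : c = ']' → 2 ≤ p.length) :
    (pvStep c p).length = if c = '[' then p.length + 1 else if c = ']' then p.length - 1 else p.length := by
  rcases hv with h | h | h <;> subst h <;> simp only [pvStep]
  · simp
  · have h2 := hb rfl
    have hd : p.dropLast ≠ [] := by
      cases p with
      | nil => simp at hp
      | cons a q => cases q with
        | nil => simp at h2
        | cons b r => simp
    simp [pvIncLastT_length _ hd]
  · simp [pvIncLastT_length _ hp]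

lemma pvBal_step (c : Char) (cs : List Char) (p : List Int)
    (hv : c = '[' ∨ c = ']' ∨ c = '.') (hp : p ≠ [])
    (hb : pvBal p.length (c :: cs) = true) :
    (c = ']' → 2 ≤ p.length) ∧ pvBal (pvStep c p).length cs = true := by
  rcases hv with h | h | h <;> subst h
  · simp [pvBal] at hb
    refine ⟨by simp, ?_⟩
    rw [pvStep_length '[' p (by tauto) hp (by simp)]
    simpa using hb
  · simp [pvBal] at hb
    refine ⟨fun _ => hb.1, ?_⟩
    rw [pvStep_length ']' p (by tauto) hp (fun _ => hb.1)]
    simpa using hb.2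
  · simp [pvBal] at hb
    refine ⟨by simp, ?_⟩
    rw [pvStep_length '.' p (by tauto) hp (by simp)]
    simpa using hb

lemma pvPaths_ge : ∀ (cs : List Char) (p : List Int),
    (∀ c ∈ cs, c = '[' ∨ c = ']' ∨ c = '.') → pvBal p.length cs = true → p ≠ [] →
    ∀ pr ∈ pvPaths cs p, pr.2 = p ∨ pvListLt p pr.2 = true := by
  intro cs
  induction cs with
  | nil => intro p _ _ _ pr h; simp [pvPaths] at h
  | cons c rest ih =>
    intro p hv hb hp pr hmem
    have hvc : c = '[' ∨ c = ']' ∨ c = '.' := hv c (by simp)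
    obtain ⟨hdep, hb'⟩ := pvBal_step c rest p hvc hp hb
    have hlt := pvStep_lt c p hvc hp hdep
    simp only [pvPaths, List.mem_cons] at hmem
    rcases hmem with h | h
    · left; rw [h]
    · have := ih (pvStep c p) (fun x hx => hv x (by simp [hx])) hb' (pvStep_ne c p hp hdep) pr h
      rcases this with h' | h'
      · right; rw [h']; exact hlt
      · right; exact pvListLt_trans _ _ _ hlt h'

lemma pvLoopB_total : ∀ (cs : List Char) (p : List Int) (acc : List (List Int)),
    (∀ c ∈ cs, c = '[' ∨ c = ']' ∨ c = '.') → pvBal p.length cs = true → p ≠ [] →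
    ∃ d, pvLoopB cs p acc = some (acc ++ d) := by
  intro cs
  induction cs with
  | nil => intro p acc _ _ _; exact ⟨[], by simp [pvLoopB]⟩
  | cons c rest ih =>
    intro p acc hv hb hp
    have hvc : c = '[' ∨ c = ']' ∨ c = '.' := hv c (by simp)
    obtain ⟨hdep, hb'⟩ := pvBal_step c rest p hvc hp hb
    have hv' : ∀ x ∈ rest, x = '[' ∨ x = ']' ∨ x = '.' := fun x hx => hv x (by simp [hx])
    have hne := pvStep_ne c p hp hdep
    rcases hvc with h | h | h <;> subst h
    · obtain ⟨d, hd⟩ := ih (p ++ [0]) acc hv' (by simpa [pvStep] using hb') (by simp)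
      exact ⟨d, by simpa [pvLoopB] using hd⟩
    · have h2 := hdep rfl
      have hdne : p.dropLast ≠ [] := by
        cases p with
        | nil => simp at hp
        | cons a q => cases q with
          | nil => simp at h2
          | cons b r => simp
      obtain ⟨d, hd⟩ := ih (pvIncLastT p.dropLast) acc hv' (by simpa [pvStep] using hb') (by simpa [pvStep] using hne)
      refine ⟨d, ?_⟩
      simpa [pvLoopB, hdne] using hd
    · obtain ⟨d, hd⟩ := ih (pvIncLastT p) (acc ++ [p]) hv' (by simpa [pvStep] using hb') (by simpa [pvStep] using hne)
      exact ⟨p :: d, by simpa [pvLoopB] using hd⟩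

lemma pvMain : ∀ (cs : List Char) (p : List Int) (acc : List (List Int)) (t : List Int),
    p ≠ [] →
    (∀ c ∈ cs, c = '[' ∨ c = ']' ∨ c = '.') →
    pvBal p.length cs = true →
    ((∃ pr ∈ pvPaths cs p, pr.1 = '.' ∧ pr.2 = t) ∨
     (∀ pr ∈ pvPaths cs p, (pr.1 = '[' ∨ pr.1 = ']') → pvListLt pr.2 t = true)) →
    t ∉ acc →
    (match pvLoopA cs (acc.length : Int) p t with | some o => o | none => none)
      = (match pvLoopB cs p acc with
         | none => none
         | some dots => if t ∈ dots then (PySem.List.index? dots t).map (fun n => (n : Int)) else none) := by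
  intro cs
  induction cs with
  | nil =>
    intro p acc t hp hv hb hH ht
    simp [pvLoopA, pvLoopB, ht]
  | cons c rest ih =>
    intro p acc t hp hv hb hH ht
    have hvc := hv c (by simp)
    obtain ⟨hdep, hb'⟩ := pvBal_step c rest p hvc hp hb
    have hlt_step := pvStep_lt c p hvc hp hdep
    have hne := pvStep_ne c p hp hdep
    have hv' : ∀ x ∈ rest, x = '[' ∨ x = ']' ∨ x = '.' := fun x hx => hv x (by simp [hx])
    have hbr : (c = '[' ∨ c = ']') → pvListLt p t = true := by
      intro hc
      rcases hH with ⟨pr, hmem, hdot, hpr2⟩ | hr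
      · simp only [pvPaths, List.mem_cons] at hmem
        rcases hmem with h | h
        · rw [h] at hdot; simp at hdot; rcases hc with h' | h' <;> simp [h'] at hdot
        · rcases pvPaths_ge rest (pvStep c p) hv' hb' hne pr h with h' | h'
          · rw [← hpr2, h']; exact hlt_step
          · exact pvListLt_trans _ _ _ hlt_step (hpr2 ▸ h')
      · exact hr (c, p) (by simp [pvPaths]) hc
    rcases hvc with h | h | h <;> subst h
    · -- '['
      have hlt := hbr (Or.inl rfl)
      have hH' : (∃ pr ∈ pvPaths rest (p ++ [0]), pr.1 = '.' ∧ pr.2 = t) ∨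
          (∀ pr ∈ pvPaths rest (p ++ [0]), (pr.1 = '[' ∨ pr.1 = ']') → pvListLt pr.2 t = true) := by
        have hst : pvStep '[' p = p ++ [0] := by simp [pvStep]
        rcases hH with ⟨pr, hmem, hd⟩ | hr
        · simp only [pvPaths, List.mem_cons] at hmem
          rcases hmem with hm | hm
          · rw [hm] at hd; simp at hd
          · exact Or.inl ⟨pr, by rwa [hst] at hm, hd⟩
        · exact Or.inr fun pr hm hc => hr pr (by simp [pvPaths, hst]; right; exact hm) hc
      simp only [pvLoopA, pvLoopB, Char.reduceEq, reduceIte, hlt, if_true]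
      exact ih (p ++ [0]) acc t (by simp) hv' (by simpa [pvStep] using hb') hH' ht
    · -- ']'
      have hlt := hbr (Or.inr rfl)
      have h2 := hdep rfl
      have hdne : p.dropLast ≠ [] := by
        cases p with
        | nil => simp at hp
        | cons a q => cases q with
          | nil => simp at h2
          | cons b r => simp
      have hst : pvStep ']' p = pvIncLastT p.dropLast := by simp [pvStep]
      have hH' : (∃ pr ∈ pvPaths rest (pvIncLastT p.dropLast), pr.1 = '.' ∧ pr.2 = t) ∨
          (∀ pr ∈ pvPaths rest (pvIncLastT p.dropLast), (pr.1 = '[' ∨ pr.1 = ']') → pvListLt pr.2 t = true) := by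
        rcases hH with ⟨pr, hmem, hd⟩ | hr
        · simp only [pvPaths, List.mem_cons] at hmem
          rcases hmem with hm | hm
          · rw [hm] at hd; simp at hd
          · exact Or.inl ⟨pr, by rwa [hst] at hm, hd⟩
        · exact Or.inr fun pr hm hc => hr pr (by simp [pvPaths, hst]; right; exact hm) hc
      simp only [pvLoopA, pvLoopB, Char.reduceEq, reduceIte, hlt, if_true, pvIncLast?_eq _ hdne, if_neg hdne]
      exact ih (pvIncLastT p.dropLast) acc t (by rwa [← hst]) hv' (by rwa [← hst]) hH' ht
    · -- '.'
      have hst : pvStep '.' p = pvIncLastT p := by simp [pvStep]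
      by_cases hpt : p = t
      · subst hpt
        obtain ⟨d, hd⟩ := pvLoopB_total rest (pvIncLastT p) (acc ++ [p]) hv' (by rwa [← hst]) (by rwa [← hst])
        simp only [pvLoopA, pvLoopB, Char.reduceEq, reduceIte, hd]
        have hmem : p ∈ acc ++ [p] ++ d := by simp
        rw [if_pos hmem]
        rw [PySem.List.index?_append_of_mem d (by simp : p ∈ acc ++ [p]),
            PySem.List.index?_append_singleton_self acc p ht]
        simp
      · have hH' : (∃ pr ∈ pvPaths rest (pvIncLastT p), pr.1 = '.' ∧ pr.2 = t) ∨
            (∀ pr ∈ pvPaths rest (pvIncLastT p), (pr.1 = '[' ∨ pr.1 = ']') → pvListLt pr.2 t = true) := by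
          rcases hH with ⟨pr, hmem, hd, hpr2⟩ | hr
          · simp only [pvPaths, List.mem_cons] at hmem
            rcases hmem with hm | hm
            · rw [hm] at hpr2; simp at hpr2; exact absurd hpr2 hpt
            · exact Or.inl ⟨pr, by rwa [hst] at hm, hd, hpr2⟩
          · exact Or.inr fun pr hm hc => hr pr (by simp [pvPaths, hst]; right; exact hm) hc
        have ht' : t ∉ acc ++ [p] := by simp [ht]; exact fun h => hpt h.symm
        have hcast : ((acc ++ [p]).length : Int) = (acc.length : Int) + 1 := by simp
        simp only [pvLoopA, pvLoopB, Char.reduceEq, reduceIte, if_neg hpt, pvIncLast?_eq _ hp]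
        have := ih (pvIncLastT p) (acc ++ [p]) t (by rwa [← hst]) hv' (by rwa [← hst]) hH' ht'
        rwa [hcast] at this

-- pvListLt is exactly the library's lexicographic '<' on List Int
lemma pvListLt_iff : ∀ (a b : List Int), pvListLt a b = true ↔ a < b := by
  intro a
  induction a with
  | nil => intro b; cases b <;> simp [pvListLt, List.nil_lt_cons]
  | cons x xs ih =>
    intro b
    cases b with
    | nil => simp [pvListLt]
    | cons y ys =>
      simp only [pvListLt, List.cons_lt_cons_iff]
      split_ifs with h1 h2 <;> simp [ih]
      · exact Or.inl h1
      · constructor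
        · omega
        · intro h; omega
      · have hxy : x = y := by omega
        simp [hxy]

-- bridge: the Bool conjuncts of Pre_ in the Prop forms the lemmas use
lemma pvPre_prop (s : String) (si : List Int) (h : Pre_get_stream_index s si) :
    (∀ c ∈ s.toList, c = '[' ∨ c = ']' ∨ c = '.') ∧
    ((∃ pr ∈ pvPaths s.toList [0], pr.1 = '.' ∧ pr.2 = si) ∨
     (∀ pr ∈ pvPaths s.toList [0], (pr.1 = '[' ∨ pr.1 = ']') → pvListLt pr.2 si = true)) := by
  obtain ⟨h1, _, h3⟩ := h
  constructor
  · intro c hc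
    have h := List.all_eq_true.mp h1 c hc
    simp at h; tauto
  · rcases Bool.or_eq_true_iff.mp h3 with h | h
    · left
      obtain ⟨pr, hm, hp⟩ := List.any_eq_true.mp h
      exact ⟨pr, hm, by simpa using hp⟩
    · right
      intro pr hm hc
      have h' := List.all_eq_true.mp h pr hm
      simp at h'
      rcases h' with ⟨h1', h2'⟩ | h'
      · rcases hc with hc | hc <;> simp [hc] at h1' h2'
      · exact (pvListLt_iff _ _).mpr h'

-- ===== VERDICT (by name: the statement is the Claim_ definition above) =====
theorem get_stream_index_spec : Claim_equal_get_stream_index := by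
  intro s t _ hpre
  obtain ⟨hv, hH⟩ := pvPre_prop s t hpre
  unfold Spec_get_stream_index get_stream_index get_stream_index_alt
  have := pvMain s.toList [0] [] t (by simp) hv (by simpa using hpre.2.1) hH (by simp)
  simpa using this
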